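-- pv_equiv track=rewrite | github.com/ashyx12/BlahBlahBlah | compiler.py | create_listing
-- ===== SOURCE A (Python) =====
-- def create_listing(source, errors):
--     lines = source.split("\n")
--     listing = []
--
--     for i, line in enumerate(lines, start=1):
--         listing.append(f"{i:04d} {line}")
--         for err in errors:
--             if f"Line {i}:" in err:
--                 listing.append(f"**** {err}")
--
--     return "\n".join(listing)
-- ===== SOURCE B (Python) =====
-- def _line_refs(err):
--     """Digit strings d such that "Line d:" occurs in err."""
--     refs = set()
--     pos = err.find("Line ")
--     while pos != -1:
--         q = pos + 5
--         r = q
--         while r < len(err) and err[r].isdigit():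
--             r += 1
--         if r > q and r < len(err) and err[r] == ":":
--             refs.add(err[q:r])
--         pos = err.find("Line ", pos + 1)
--     return refs
--
--
-- def create_listing(source, errors):
--     buckets = {}
--     for err in errors:
--         for key in _line_refs(err):
--             buckets.setdefault(key, []).append(err)
--     out = []
--     for i, line in enumerate(source.split("\n"), start=1):
--         out.append(f"{i:04d} {line}")
--         out.extend(f"**** {e}" for e in buckets.get(str(i), ()))
--     return "\n".join(out)
-- ===== Notes on version B (the rewrite author's own statement) =====
-- stated objective: alternative
-- what changed: Instead of rescanning every error string for the needle 'Line {i}:' once per source line (lines x errors substring searches), B scans each error once, collects the set of 'Line <digits>:' references it contains, and indexes the errors in a dict keyed by the referenced line number, so each line's errors come from one dict lookup.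
import Mathlib
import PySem

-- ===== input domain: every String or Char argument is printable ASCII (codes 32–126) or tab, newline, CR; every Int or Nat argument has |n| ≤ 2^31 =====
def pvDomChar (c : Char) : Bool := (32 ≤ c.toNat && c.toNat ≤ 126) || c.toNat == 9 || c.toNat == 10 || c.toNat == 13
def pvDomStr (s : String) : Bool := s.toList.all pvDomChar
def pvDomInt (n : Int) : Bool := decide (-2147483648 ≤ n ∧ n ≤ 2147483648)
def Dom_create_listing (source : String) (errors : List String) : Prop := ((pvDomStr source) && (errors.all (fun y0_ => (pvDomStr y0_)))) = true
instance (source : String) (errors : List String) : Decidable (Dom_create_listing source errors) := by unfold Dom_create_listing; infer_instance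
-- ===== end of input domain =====

-- B scans each error once for "Line <digits>:" references and indexes the errors by referenced
-- line number in a dict, replacing A's per-line substring scan over all errors with one lookup.


-- ===== PORT A =====
-- f"{i:04d} {line}"  (exact: {:04d} on an int = str(i) zero-filled to width 4)
def pvNum4 (i : Int) (line : List Char) : List Char :=
  PySem.Chars.zfill (PySem.Int.toChars i) 4 ++ ' ' :: line

def create_listing (source : String) (errors : List String) : String :=
  let lines := PySem.Chars.splitOn source.toList ['\n']
  let listing := (PySem.List.enumerate lines 1).foldl
    (fun acc p =>
      let acc := acc ++ [pvNum4 p.1 p.2]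
      errors.foldl
        (fun acc err =>
          if PySem.Chars.isIn (['L', 'i', 'n', 'e', ' '] ++ PySem.Int.toChars p.1 ++ [':']) err.toList
          then acc ++ [['*', '*', '*', '*', ' '] ++ err.toList] else acc)
        acc)
    []
  String.mk (PySem.Chars.join ['\n'] listing)

-- ===== PORT B =====
-- "0" <= c <= "9"  (err[r].isdigit() on the ASCII domain)
def pvDig (c : Char) : Bool := decide ('0' ≤ c ∧ c ≤ '9')

-- the body of B's while-loop at one occurrence of "Line ": take the digit run, require it
-- nonempty and followed by ":"
def pvTryRef : List Char → Option (List Char)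
  | 'L' :: 'i' :: 'n' :: 'e' :: ' ' :: rest =>
    (match rest.dropWhile pvDig with
     | ':' :: _ => if rest.takeWhile pvDig = [] then none else some (rest.takeWhile pvDig)
     | _ => none)
  | _ => none

-- B's 'while pos != -1' find-loop, as the scan over successive suffixes of err
def pvRefsGo : List Char → PySem.Set (List Char) → PySem.Set (List Char)
  | [], refs => refs
  | c :: rest, refs =>
    match pvTryRef (c :: rest) with
    | some d => pvRefsGo rest (PySem.Set.add refs d)
    | none => pvRefsGo rest refs

def pvLineRefs (cs : List Char) : PySem.Set (List Char) := pvRefsGo cs PySem.Set.empty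

def pvBuckets (errors : List String) : PySem.Dict (List Char) (List (List Char)) :=
  errors.foldl
    (fun b err =>
      (pvLineRefs err.toList).foldl
        (fun b key => b.insert key (b.getD key [] ++ [err.toList])) b)
    PySem.Dict.empty

def create_listing_alt (source : String) (errors : List String) : String :=
  let buckets := pvBuckets errors
  let out := (PySem.List.enumerate (PySem.Chars.splitOn source.toList ['\n']) 1).foldl
    (fun acc p =>
      let acc := acc ++ [pvNum4 p.1 p.2]
      (buckets.getD (PySem.Int.toChars p.1) []).foldl
        (fun acc e => acc ++ [['*', '*', '*', '*', ' '] ++ e]) acc)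
    []
  String.mk (PySem.Chars.join ['\n'] out)

-- ===== PRECONDITION & SPEC =====
def Spec_create_listing (source : String) (errors : List String) (out : String) : Prop := out = create_listing_alt source errors
instance (source : String) (errors : List String) (out : String) : Decidable (Spec_create_listing source errors out) := by unfold Spec_create_listing; infer_instance

-- ===== CLAIM (what is proved, stated in full; the proofs are below) =====
def Claim_equal_create_listing : Prop := ∀ (source : String) (errors : List String), Dom_create_listing source errors → Spec_create_listing source errors (create_listing source errors)

-- ===== LEMMAS AND PROOFS =====

def pvNeedle (d : List Char) : List Char := ['L', 'i', 'n', 'e', ' '] ++ d ++ [':']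

theorem pv_digitChar_dig (n : ℕ) (h : n < 10) : pvDig (Nat.digitChar n) = true := by
  interval_cases n <;> decide

theorem pv_toDigitsCore_dig : ∀ (f n : ℕ) (acc : List Char),
    (∀ c ∈ acc, pvDig c = true) → ∀ c ∈ Nat.toDigitsCore 10 f n acc, pvDig c = true := by
  intro f
  induction f with
  | zero => intro n acc hacc; simpa [Nat.toDigitsCore] using hacc
  | succ f ih =>
    intro n acc hacc c hc
    simp only [Nat.toDigitsCore] at hc
    by_cases h : n / 10 = 0
    · rw [if_pos h] at hc
      rcases List.mem_cons.mp hc with hc | hc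
      · subst hc; exact pv_digitChar_dig _ (Nat.mod_lt _ (by omega))
      · exact hacc _ hc
    · rw [if_neg h] at hc
      refine ih (n / 10) _ ?_ c hc
      intro x hx
      rcases List.mem_cons.mp hx with hx | hx
      · subst hx; exact pv_digitChar_dig _ (Nat.mod_lt _ (by omega))
      · exact hacc _ hx

theorem pv_toDigitsCore_head : ∀ (f n : ℕ) (acc : List Char), n < f →
    ∃ c t, Nat.toDigitsCore 10 f n acc = c :: t := by
  intro f
  induction f with
  | zero => intro n acc hf; omega
  | succ f ih =>
    intro n acc hf
    simp only [Nat.toDigitsCore]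
    by_cases h : n / 10 = 0
    · rw [if_pos h]
      exact ⟨_, _, rfl⟩
    · rw [if_neg h]
      exact ih (n / 10) _ (by omega)

theorem pv_toChars_spec (i : Int) (h : 1 ≤ i) :
    ∃ c ds, PySem.Int.toChars i = c :: ds ∧ ∀ x ∈ c :: ds, pvDig x = true := by
  unfold PySem.Int.toChars
  rw [if_neg (by omega)]
  unfold Nat.toDigits
  obtain ⟨c, t, heq⟩ := pv_toDigitsCore_head (i.toNat + 1) i.toNat [] (by omega)
  have hdig := pv_toDigitsCore_dig (i.toNat + 1) i.toNat [] (by simp)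
  rw [heq] at hdig
  exact ⟨c, t, heq, hdig⟩

theorem pv_tryRef_of_prefix (i : Int) (h : 1 ≤ i) (rest : List Char) :
    pvTryRef (pvNeedle (PySem.Int.toChars i) ++ rest) = some (PySem.Int.toChars i) := by
  obtain ⟨c, ds, heq, hdig⟩ := pv_toChars_spec i h
  rw [heq]
  have hre : pvNeedle (c :: ds) ++ rest
      = 'L' :: 'i' :: 'n' :: 'e' :: ' ' :: ((c :: ds) ++ ':' :: rest) := by
    simp [pvNeedle]
  rw [hre, pvTryRef]
  have hcolon : pvDig ':' = false := by decide
  have hdrop : ((c :: ds) ++ ':' :: rest).dropWhile pvDig = ':' :: rest := by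
    rw [List.dropWhile_append_of_pos hdig, List.dropWhile_cons_of_neg (by simp [hcolon])]
  have htake : ((c :: ds) ++ ':' :: rest).takeWhile pvDig = c :: ds := by
    rw [List.takeWhile_append_of_pos hdig, List.takeWhile_cons_of_neg (by simp [hcolon])]
    simp
  rw [hdrop, htake]
  simp

theorem pv_prefix_of_tryRef (t d : List Char) (h : pvTryRef t = some d) :
    pvNeedle d <+: t := by
  unfold pvTryRef at h
  split at h
  case _ rest =>
    split at h
    case _ u heq =>
      split_ifs at h with hnil
      have hd : rest.takeWhile pvDig = d := by injection h
      refine ⟨u, ?_⟩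
      have hcr : d ++ ':' :: u = rest := by
        rw [← hd, ← heq]; exact List.takeWhile_append_dropWhile
      simp only [pvNeedle, List.append_assoc, List.cons_append, List.nil_append]
      rw [hcr]
    case _ => exact absurd h (by simp)
  case _ => exact absurd h (by simp)

theorem pv_tryRef_nil : pvTryRef [] = none := rfl

theorem pv_mem_refsGo (cs : List Char) : ∀ (refs : PySem.Set (List Char)) (d : List Char),
    d ∈ pvRefsGo cs refs ↔ d ∈ refs ∨ ∃ j, pvTryRef (cs.drop j) = some d := by
  induction cs with
  | nil =>
    intro refs d
    simp [pvRefsGo, pv_tryRef_nil]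
  | cons c rest ih =>
    intro refs d
    rw [pvRefsGo]
    cases h : pvTryRef (c :: rest) with
    | some d0 =>
      rw [ih]
      rw [PySem.Set.mem_add]
      constructor
      · rintro ((hm | hm) | ⟨j, hj⟩)
        · exact Or.inl hm
        · subst hm; exact Or.inr ⟨0, by simpa using h⟩
        · exact Or.inr ⟨j + 1, hj⟩
      · rintro (hm | ⟨j, hj⟩)
        · exact Or.inl (Or.inl hm)
        · cases j with
          | zero =>
            have : d0 = d := by simpa [h] using hj
            exact Or.inl (Or.inr this.symm)
          | succ j => exact Or.inr ⟨j, hj⟩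
    | none =>
      rw [ih]
      constructor
      · rintro (hm | ⟨j, hj⟩)
        · exact Or.inl hm
        · exact Or.inr ⟨j + 1, hj⟩
      · rintro (hm | ⟨j, hj⟩)
        · exact Or.inl hm
        · cases j with
          | zero => simp [h] at hj
          | succ j => exact Or.inr ⟨j, hj⟩

theorem pv_key (i : Int) (h : 1 ≤ i) (e : List Char) :
    PySem.Chars.isIn (pvNeedle (PySem.Int.toChars i)) e = true
      ↔ PySem.Int.toChars i ∈ pvLineRefs e := by
  rw [← PySem.Chars.exists_prefix_drop_iff_isIn]
  rw [pvLineRefs, pv_mem_refsGo]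
  simp only [PySem.Set.empty, List.not_mem_nil, false_or]
  constructor
  · rintro ⟨j, t, ht⟩
    exact ⟨j, by rw [← ht]; exact pv_tryRef_of_prefix i h t⟩
  · rintro ⟨j, hj⟩
    exact ⟨j, pv_prefix_of_tryRef _ _ hj⟩

theorem pv_nodup_refsGo (cs : List Char) : ∀ (refs : PySem.Set (List Char)),
    refs.Nodup → (pvRefsGo cs refs).Nodup := by
  induction cs with
  | nil => intro refs h; simpa [pvRefsGo] using h
  | cons c rest ih =>
    intro refs h
    rw [pvRefsGo]
    cases pvTryRef (c :: rest) with
    | some d0 => exact ih _ (PySem.Set.nodup_add _ _ h)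
    | none => exact ih refs h

theorem pv_nodup_lineRefs (cs : List Char) : (pvLineRefs cs).Nodup :=
  pv_nodup_refsGo cs PySem.Set.empty List.nodup_nil

theorem pv_getD_refsFold (e : List Char) (key : List Char) :
    ∀ (refs : List (List Char)), refs.Nodup →
    ∀ (b : PySem.Dict (List Char) (List (List Char))),
    (refs.foldl (fun b k => b.insert k (b.getD k [] ++ [e])) b).getD key []
      = b.getD key [] ++ (if key ∈ refs then [e] else []) := by
  intro refs
  induction refs with
  | nil => intro _ b; simp
  | cons r rs ih =>
    intro hnd b
    rw [List.foldl_cons, ih (List.nodup_cons.mp hnd).2]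
    rw [PySem.Dict.getD_insert]
    by_cases hkr : key = r
    · have hknr : key ∉ rs := hkr ▸ (List.nodup_cons.mp hnd).1
      rw [if_pos hkr, if_neg hknr, if_pos (hkr ▸ List.mem_cons_self)]
      rw [hkr]
      simp
    · rw [if_neg hkr]
      by_cases hkrs : key ∈ rs
      · rw [if_pos hkrs, if_pos (List.mem_cons.mpr (Or.inr hkrs))]
      · rw [if_neg hkrs, if_neg (by simp [hkr, hkrs])]

theorem pv_getD_buckets_aux (key : List Char) : ∀ (errors : List String)
    (b : PySem.Dict (List Char) (List (List Char))),
    (errors.foldl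
      (fun b err => (pvLineRefs err.toList).foldl
        (fun b k => b.insert k (b.getD k [] ++ [err.toList])) b) b).getD key []
    = b.getD key []
      ++ (errors.filter (fun err => decide (key ∈ pvLineRefs err.toList))).map String.toList := by
  intro errors
  induction errors with
  | nil => intro b; simp
  | cons e es ih =>
    intro b
    rw [List.foldl_cons, ih, pv_getD_refsFold e.toList key _ (pv_nodup_lineRefs _)]
    by_cases hm : key ∈ pvLineRefs e.toList
    · simp [hm]
    · simp [hm]

theorem pv_getD_buckets (errors : List String) (key : List Char) :
    (pvBuckets errors).getD key []
      = (errors.filter (fun err => decide (key ∈ pvLineRefs err.toList))).map String.toList := by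
  unfold pvBuckets
  rw [pv_getD_buckets_aux]
  simp

-- ===== VERDICT (by name: the statement is the Claim_ definition above) =====
theorem create_listing_spec : Claim_equal_create_listing := by
  intro source errors _
  unfold Spec_create_listing create_listing create_listing_alt
  refine congrArg String.mk (congrArg (PySem.Chars.join ['\n']) ?_)
  apply PySem.List.foldl_congr_mem
  intro acc p hp
  rcases (PySem.List.mem_enumerate_iff _ _ _).mp hp with ⟨k, hk, rfl⟩
  have hi : (1 : Int) ≤ 1 + (k : Int) := by omega
  dsimp only
  rw [PySem.List.foldl_append_if, PySem.List.foldl_append_singleton_eq_map]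
  rw [pv_getD_buckets, List.map_map]
  have hfilter : errors.filter
        (fun err => PySem.Chars.isIn
          (['L', 'i', 'n', 'e', ' '] ++ PySem.Int.toChars (1 + (k : Int)) ++ [':']) err.toList)
      = errors.filter
        (fun err => decide (PySem.Int.toChars (1 + (k : Int)) ∈ pvLineRefs err.toList)) := by
    apply List.filter_congr
    intro x hx
    rw [Bool.eq_iff_iff, decide_eq_true_iff]
    exact pv_key _ hi x.toList
  rw [hfilter]
  rfl
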